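-- pv_equiv track=rewrite | github.com/sibilianspirit/calabria | convert-to-hugo.py | get_translation_key
-- ===== SOURCE A (Python) =====
-- PL_EN_MAP = {
--     "pl/kierunki": "destinations",
--     "pl/natura": "nature",
--     "pl/kuchnia": "cuisine",
--     "pl/kultura": "culture",
--     "pl/praktyczne": "practical",
--     "pl/kontakt": "contact",
--     "pl/o-nas": "about",
--     "pl/wspolpraca": "partnership",
--     "pl/plaze": "nature/beaches",
-- }
--
-- SLUG_MAP = {
--     "bronzy-z-riace": "bronzi-di-riace",
--     "kosciol-piedigrotta": "piedigrotta-church",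
--     "castello-murat": "castello-murat",
--     "tartufo-gelato": "tartufo-gelato",
--     "tradycja-polowu-miecznika": "swordfish-tradition",
--     "castello-ruffo": "castello-ruffo",
--     "festiwal-czerwonej-cebuli": "red-onion-festival",
--     "plaze-tropea": "tropea-beaches",
--     "santa-maria-dell-isola": "santa-maria-dell-isola",
--     "dziedzictwo-grekanickie": "grecanico-heritage",
--     "dziedzictwo-bizantyjskie": "byzantine-heritage",
--     "tradycje-i-festiwale": "traditions-festivals",
--     "magna-graecia": "magna-graecia",
--     "bergamotka": "bergamot",
--     "makaron-fileja": "fileja-pasta",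
--     "wino-kalabryjskie": "calabrian-wine",
--     "nduja": "nduja",
--     "street-food": "street-food",
--     "jak-dojechac": "getting-there",
--     "noclegi": "accommodation",
--     "wynajem-samochodu": "car-rental",
--     "plan-7-dni": "itinerary-7-days",
--     "kierunki": "destinations",
--     "natura": "nature",
--     "kuchnia": "cuisine",
--     "kultura": "culture",
--     "praktyczne": "practical",
--     "aspromonte": "aspromonte",
--     "sila": "sila",
--     "pollino": "pollino",
--     "costa-viola": "costa-viola",
--     "capo-vaticano": "capo-vaticano",
-- }
--
-- def get_translation_key(path):
--     """Generate a translation key that matches PL and EN pages."""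
--     # For PL pages, map to EN equivalent
--     for pl_prefix, en_prefix in PL_EN_MAP.items():
--         if path.startswith(pl_prefix + "/"):
--             rest = path[len(pl_prefix) + 1:]
--             # Map PL slug to EN slug
--             parts = rest.split("/")
--             mapped_parts = [SLUG_MAP.get(p, p) for p in parts]
--             return en_prefix + "/" + "/".join(mapped_parts)
--         elif path == pl_prefix:
--             return en_prefix
--
--     # For EN pages, key is the path itself
--     return path
-- ===== SOURCE B (Python) =====
-- PL_EN_MAP = {
--     "pl/kierunki": "destinations",
--     "pl/natura": "nature",
--     "pl/kuchnia": "cuisine",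
--     "pl/kultura": "culture",
--     "pl/praktyczne": "practical",
--     "pl/kontakt": "contact",
--     "pl/o-nas": "about",
--     "pl/wspolpraca": "partnership",
--     "pl/plaze": "nature/beaches",
-- }
--
-- SLUG_MAP = {
--     "bronzy-z-riace": "bronzi-di-riace",
--     "kosciol-piedigrotta": "piedigrotta-church",
--     "castello-murat": "castello-murat",
--     "tartufo-gelato": "tartufo-gelato",
--     "tradycja-polowu-miecznika": "swordfish-tradition",
--     "castello-ruffo": "castello-ruffo",
--     "festiwal-czerwonej-cebuli": "red-onion-festival",
--     "plaze-tropea": "tropea-beaches",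
--     "santa-maria-dell-isola": "santa-maria-dell-isola",
--     "dziedzictwo-grekanickie": "grecanico-heritage",
--     "dziedzictwo-bizantyjskie": "byzantine-heritage",
--     "tradycje-i-festiwale": "traditions-festivals",
--     "magna-graecia": "magna-graecia",
--     "bergamotka": "bergamot",
--     "makaron-fileja": "fileja-pasta",
--     "wino-kalabryjskie": "calabrian-wine",
--     "nduja": "nduja",
--     "street-food": "street-food",
--     "jak-dojechac": "getting-there",
--     "noclegi": "accommodation",
--     "wynajem-samochodu": "car-rental",
--     "plan-7-dni": "itinerary-7-days",
--     "kierunki": "destinations",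
--     "natura": "nature",
--     "kuchnia": "cuisine",
--     "kultura": "culture",
--     "praktyczne": "practical",
--     "aspromonte": "aspromonte",
--     "sila": "sila",
--     "pollino": "pollino",
--     "costa-viola": "costa-viola",
--     "capo-vaticano": "capo-vaticano",
-- }
--
--
-- def _slug_en(p):
--     """EN slug for a PL slug (identity if unknown)."""
--     return SLUG_MAP.get(p, p)
--
--
-- def get_translation_key(path):
--     """Generate a translation key that matches PL and EN pages."""
--     parts = path.split("/")
--     prefix = "/".join(parts[:2])
--     en_prefix = PL_EN_MAP.get(prefix)
--     if en_prefix is None: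
--         # EN pages: the key is the path itself
--         return path
--     if path == prefix:
--         return en_prefix
--     return en_prefix + "/" + "/".join(map(_slug_en, parts[2:]))
-- ===== Notes on version B (the rewrite author's own statement) =====
-- stated objective: simpler
-- what changed: Instead of scanning PL_EN_MAP with a startswith test per entry, B splits the path once into segments, computes the two-segment prefix key and does one direct dict lookup on it, then maps the remaining segments through SLUG_MAP.
import Mathlib
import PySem

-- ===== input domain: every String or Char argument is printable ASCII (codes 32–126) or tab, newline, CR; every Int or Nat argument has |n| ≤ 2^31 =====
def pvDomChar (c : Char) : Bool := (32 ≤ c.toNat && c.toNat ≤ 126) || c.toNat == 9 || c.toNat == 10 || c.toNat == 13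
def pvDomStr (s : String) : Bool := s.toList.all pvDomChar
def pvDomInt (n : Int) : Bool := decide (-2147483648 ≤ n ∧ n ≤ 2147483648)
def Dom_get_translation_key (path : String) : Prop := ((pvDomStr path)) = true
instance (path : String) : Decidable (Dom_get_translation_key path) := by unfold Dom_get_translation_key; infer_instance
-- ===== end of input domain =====

-- B replaces A's linear scan over PL_EN_MAP (startswith per entry) by splitting the path once and
-- looking up the two-segment prefix directly; objective: simpler.

-- ===== PORT A =====
-- module constant PL_EN_MAP as A iterates it (a dict's items in insertion order)
def pvPlEnMap : List (String × String) :=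
  [("pl/kierunki", "destinations"), ("pl/natura", "nature"), ("pl/kuchnia", "cuisine"),
   ("pl/kultura", "culture"), ("pl/praktyczne", "practical"), ("pl/kontakt", "contact"),
   ("pl/o-nas", "about"), ("pl/wspolpraca", "partnership"), ("pl/plaze", "nature/beaches")]

-- module constant SLUG_MAP as A uses it (a dict with .get)
def pvSlugDict : PySem.Dict (List Char) (List Char) := PySem.Dict.mk
  [("bronzy-z-riace".toList, "bronzi-di-riace".toList),
   ("kosciol-piedigrotta".toList, "piedigrotta-church".toList),
   ("castello-murat".toList, "castello-murat".toList),
   ("tartufo-gelato".toList, "tartufo-gelato".toList),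
   ("tradycja-polowu-miecznika".toList, "swordfish-tradition".toList),
   ("castello-ruffo".toList, "castello-ruffo".toList),
   ("festiwal-czerwonej-cebuli".toList, "red-onion-festival".toList),
   ("plaze-tropea".toList, "tropea-beaches".toList),
   ("santa-maria-dell-isola".toList, "santa-maria-dell-isola".toList),
   ("dziedzictwo-grekanickie".toList, "grecanico-heritage".toList),
   ("dziedzictwo-bizantyjskie".toList, "byzantine-heritage".toList),
   ("tradycje-i-festiwale".toList, "traditions-festivals".toList),
   ("magna-graecia".toList, "magna-graecia".toList),
   ("bergamotka".toList, "bergamot".toList),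
   ("makaron-fileja".toList, "fileja-pasta".toList),
   ("wino-kalabryjskie".toList, "calabrian-wine".toList),
   ("nduja".toList, "nduja".toList),
   ("street-food".toList, "street-food".toList),
   ("jak-dojechac".toList, "getting-there".toList),
   ("noclegi".toList, "accommodation".toList),
   ("wynajem-samochodu".toList, "car-rental".toList),
   ("plan-7-dni".toList, "itinerary-7-days".toList),
   ("kierunki".toList, "destinations".toList),
   ("natura".toList, "nature".toList),
   ("kuchnia".toList, "cuisine".toList),
   ("kultura".toList, "culture".toList),
   ("praktyczne".toList, "practical".toList),
   ("aspromonte".toList, "aspromonte".toList),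
   ("sila".toList, "sila".toList),
   ("pollino".toList, "pollino".toList),
   ("costa-viola".toList, "costa-viola".toList),
   ("capo-vaticano".toList, "capo-vaticano".toList)]

-- SLUG_MAP.get(p, p) as A writes it
def pvMapSlug (q : List Char) : List Char := PySem.Dict.getD pvSlugDict q q

-- the for-loop of A over PL_EN_MAP.items(), with its two early returns
def pvALoop : List (String × String) → List Char → List Char
  | [], p => p
  | (pl, en) :: rest, p =>
    if PySem.Chars.startswith p (pl.toList ++ ['/']) then
      en.toList ++ ['/'] ++
        PySem.Chars.join ['/']
          ((PySem.Chars.splitOn (PySem.List.slice p (some (PySem.Str.len pl + 1)) none) ['/']).map pvMapSlug)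
    else if p = pl.toList then en.toList
    else pvALoop rest p

def get_translation_key (path : String) : String :=
  String.ofList (pvALoop pvPlEnMap path.toList)

-- ===== PORT B =====
-- PL_EN_MAP.get(prefix): the dict literal ported as a first-match chain over its (distinct) keys
def pvEnPrefix? (s : List Char) : Option (List Char) :=
  if s = "pl/kierunki".toList then some "destinations".toList
  else if s = "pl/natura".toList then some "nature".toList
  else if s = "pl/kuchnia".toList then some "cuisine".toList
  else if s = "pl/kultura".toList then some "culture".toList
  else if s = "pl/praktyczne".toList then some "practical".toList
  else if s = "pl/kontakt".toList then some "contact".toList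
  else if s = "pl/o-nas".toList then some "about".toList
  else if s = "pl/wspolpraca".toList then some "partnership".toList
  else if s = "pl/plaze".toList then some "nature/beaches".toList
  else none

-- _slug_en(p) = SLUG_MAP.get(p, p): the dict literal ported the same way
def pvSlugEn (p : List Char) : List Char :=
  if p = "bronzy-z-riace".toList then "bronzi-di-riace".toList
  else if p = "kosciol-piedigrotta".toList then "piedigrotta-church".toList
  else if p = "castello-murat".toList then "castello-murat".toList
  else if p = "tartufo-gelato".toList then "tartufo-gelato".toList
  else if p = "tradycja-polowu-miecznika".toList then "swordfish-tradition".toList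
  else if p = "castello-ruffo".toList then "castello-ruffo".toList
  else if p = "festiwal-czerwonej-cebuli".toList then "red-onion-festival".toList
  else if p = "plaze-tropea".toList then "tropea-beaches".toList
  else if p = "santa-maria-dell-isola".toList then "santa-maria-dell-isola".toList
  else if p = "dziedzictwo-grekanickie".toList then "grecanico-heritage".toList
  else if p = "dziedzictwo-bizantyjskie".toList then "byzantine-heritage".toList
  else if p = "tradycje-i-festiwale".toList then "traditions-festivals".toList
  else if p = "magna-graecia".toList then "magna-graecia".toList
  else if p = "bergamotka".toList then "bergamot".toList
  else if p = "makaron-fileja".toList then "fileja-pasta".toList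
  else if p = "wino-kalabryjskie".toList then "calabrian-wine".toList
  else if p = "nduja".toList then "nduja".toList
  else if p = "street-food".toList then "street-food".toList
  else if p = "jak-dojechac".toList then "getting-there".toList
  else if p = "noclegi".toList then "accommodation".toList
  else if p = "wynajem-samochodu".toList then "car-rental".toList
  else if p = "plan-7-dni".toList then "itinerary-7-days".toList
  else if p = "kierunki".toList then "destinations".toList
  else if p = "natura".toList then "nature".toList
  else if p = "kuchnia".toList then "cuisine".toList
  else if p = "kultura".toList then "culture".toList
  else if p = "praktyczne".toList then "practical".toList
  else if p = "aspromonte".toList then "aspromonte".toList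
  else if p = "sila".toList then "sila".toList
  else if p = "pollino".toList then "pollino".toList
  else if p = "costa-viola".toList then "costa-viola".toList
  else if p = "capo-vaticano".toList then "capo-vaticano".toList
  else p

def get_translation_key_alt (path : String) : String :=
  let parts := PySem.Chars.splitOn path.toList ['/']
  let pre2 := PySem.Chars.join ['/'] (parts.take 2)
  match pvEnPrefix? pre2 with
  | none => path
  | some en =>
    if path.toList = pre2 then String.ofList en
    else String.ofList (en ++ ['/'] ++ PySem.Chars.join ['/'] ((parts.drop 2).map pvSlugEn))

-- ===== PRECONDITION & SPEC =====
def Spec_get_translation_key (path : String) (out : String) : Prop := out = get_translation_key_alt path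
instance (path : String) (out : String) : Decidable (Spec_get_translation_key path out) := by unfold Spec_get_translation_key; infer_instance

-- ===== CLAIM (what is proved, stated in full; the proofs are below) =====
def Claim_equal_get_translation_key : Prop := ∀ (path : String), Dom_get_translation_key path → Spec_get_translation_key path (get_translation_key path)

-- ===== LEMMAS AND PROOFS =====

-- A's dict-based lookups coincide pointwise with B's match chains
lemma pvGetStep (k v : List Char) (rest : List (List Char × List Char)) (s : List Char) :
    PySem.Dict.get? (PySem.Dict.mk ((k, v) :: rest)) s
      = if s = k then some v else PySem.Dict.get? (PySem.Dict.mk rest) s := by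
  by_cases h : s = k
  · subst h; simp [PySem.Dict.get?, List.find?]
  · simp only [PySem.Dict.get?, List.find?, if_neg h]
    rw [show (k == s) = false by simp [beq_eq_decide]; exact fun hh => h hh.symm]

lemma pvGetBase (s : List Char) :
    PySem.Dict.get? (PySem.Dict.mk ([] : List (List Char × List Char))) s = none := by
  simp [PySem.Dict.get?, List.find?]

lemma pvEnPrefix?_eq (s : List Char) :
    PySem.Dict.get? (PySem.Dict.mk (pvPlEnMap.map (fun kv => (kv.1.toList, kv.2.toList)))) s = pvEnPrefix? s := by
  simp only [pvPlEnMap, List.map_cons, List.map_nil, pvGetStep, pvGetBase, pvEnPrefix?]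

lemma pvSlugEn_eq (q : List Char) : pvMapSlug q = pvSlugEn q := by
  rw [pvMapSlug, PySem.Dict.getD_eq_get?_getD]
  simp only [pvSlugDict, pvGetStep, pvGetBase, apply_ite (Option.getD · q),
    Option.getD_some, Option.getD_none, pvSlugEn]

-- proof-side structural version of splitOn with separator "/"
def pvSplit : List Char → List (List Char)
  | [] => [[]]
  | c :: t => if c = '/' then [] :: pvSplit t else (pvSplit t).modifyHead (c :: ·)

lemma pvSplit_ne_nil (l : List Char) : pvSplit l ≠ [] := by
  induction l with
  | nil => simp [pvSplit]
  | cons c t ih =>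
    obtain ⟨h0, r0, hr⟩ := List.exists_cons_of_ne_nil ih
    simp only [pvSplit]
    split_ifs
    · simp
    · simp [hr, List.modifyHead]

lemma pvGo_eq : ∀ (fuel : Nat) (l cur : List Char) (acc : List (List Char)), l.length < fuel →
    PySem.Chars.splitOn.go ['/'] fuel l cur acc =
      acc.reverse ++ (pvSplit l).modifyHead (cur.reverse ++ ·) := by
  intro fuel
  induction fuel with
  | zero => intro l cur acc h; omega
  | succ f ih =>
    intro l cur acc h
    cases l with
    | nil =>
      rw [PySem.Chars.splitOn.go.eq_def]
      simp [pvSplit]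
    | cons c rest =>
      rw [PySem.Chars.splitOn.go.eq_def]
      simp only []
      by_cases hc : c = '/'
      · subst hc
        have hpre : List.isPrefixOf ['/'] ('/' :: rest) = true := by simp [List.isPrefixOf]
        simp only [hpre, if_pos, List.length_cons, List.drop_succ_cons, List.length_nil, List.drop_zero]
        rw [ih rest [] (cur.reverse :: acc) (by simpa using Nat.lt_of_succ_lt_succ h)]
        obtain ⟨h0, r0, hr⟩ := List.exists_cons_of_ne_nil (pvSplit_ne_nil rest)
        simp [pvSplit, hr, List.modifyHead]
      · have hpre : List.isPrefixOf ['/'] (c :: rest) = false := by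
          simp [List.isPrefixOf]; exact fun hh => absurd hh.symm hc
        simp only [hpre, Bool.false_eq_true, if_false]
        rw [ih rest (c :: cur) acc (by simpa using Nat.lt_of_succ_lt_succ h)]
        obtain ⟨h0, r0, hr⟩ := List.exists_cons_of_ne_nil (pvSplit_ne_nil rest)
        simp [pvSplit, hc, hr, List.modifyHead]

lemma pvSplitOn_eq (l : List Char) : PySem.Chars.splitOn l ['/'] = pvSplit l := by
  have := pvGo_eq (l.length + 1) l [] [] (by omega)
  simp only [List.reverse_nil, List.nil_append] at this
  rw [PySem.Chars.splitOn, this]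
  obtain ⟨h0, r0, hr⟩ := List.exists_cons_of_ne_nil (pvSplit_ne_nil l)
  simp [hr, List.modifyHead]

lemma pvSplit_no_sep {a : List Char} (h : '/' ∉ a) : pvSplit a = [a] := by
  induction a with
  | nil => simp [pvSplit]
  | cons c t ih =>
    have hc : c ≠ '/' := fun hc => h (hc ▸ List.mem_cons_self ..)
    simp [pvSplit, hc, ih (fun ht => h (List.mem_cons_of_mem _ ht)), List.modifyHead]

lemma pvSplit_append {a : List Char} (b : List Char) (h : '/' ∉ a) :
    pvSplit (a ++ '/' :: b) = a :: pvSplit b := by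
  induction a with
  | nil => simp [pvSplit]
  | cons c t ih =>
    have hc : c ≠ '/' := fun hc => h (hc ▸ List.mem_cons_self ..)
    simp [pvSplit, hc, ih (fun ht => h (List.mem_cons_of_mem _ ht)), List.modifyHead]

lemma pvMem_pvSplit_no_sep : ∀ (l : List Char), ∀ x ∈ pvSplit l, '/' ∉ x := by
  intro l
  induction l with
  | nil => simp [pvSplit]
  | cons c t ih =>
    by_cases hc : c = '/'
    · subst hc
      simp only [pvSplit]
      intro x hx
      rcases List.mem_cons.mp hx with h | h
      · simp [h]
      · exact ih x h
    · obtain ⟨h0, r0, hr⟩ := List.exists_cons_of_ne_nil (pvSplit_ne_nil t)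
      simp only [pvSplit, if_neg hc, hr, List.modifyHead]
      intro x hx
      rcases List.mem_cons.mp hx with h | h
      · subst h
        intro hmem
        rcases List.mem_cons.mp hmem with h | h
        · exact hc h.symm
        · exact ih h0 (hr ▸ List.mem_cons_self ..) h
      · exact ih x (hr ▸ List.mem_cons_of_mem _ h)

lemma pvJoin_pvSplit : ∀ (l : List Char), PySem.Chars.join ['/'] (pvSplit l) = l := by
  intro l
  induction l with
  | nil => simp [pvSplit, PySem.Chars.join_singleton]
  | cons c t ih =>
    by_cases hc : c = '/'
    · subst hc
      obtain ⟨h0, r0, hr⟩ := List.exists_cons_of_ne_nil (pvSplit_ne_nil t)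
      rw [pvSplit, if_pos rfl, hr, PySem.Chars.join_cons_cons, ← hr, ih]
      simp
    · obtain ⟨h0, r0, hr⟩ := List.exists_cons_of_ne_nil (pvSplit_ne_nil t)
      rw [pvSplit, if_neg hc, hr, List.modifyHead]
      cases r0 with
      | nil =>
        rw [PySem.Chars.join_singleton]
        rw [hr, PySem.Chars.join_singleton] at ih
        simp [ih]
      | cons q r1 =>
        rw [PySem.Chars.join_cons_cons]
        rw [hr, PySem.Chars.join_cons_cons] at ih
        simp only [List.cons_append, List.append_assoc, List.nil_append] at ih ⊢
        simpa using ih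

lemma pvSegUnique : ∀ (a x b y : List Char), '/' ∉ a → '/' ∉ x →
    a ++ '/' :: b = x ++ '/' :: y → a = x ∧ b = y := by
  intro a
  induction a with
  | nil =>
    intro x b y _ hx h
    cases x with
    | nil => simpa using h
    | cons c t =>
      simp only [List.nil_append, List.cons_append, List.cons.injEq] at h
      exact absurd (h.1 ▸ List.mem_cons_self ..) hx
  | cons c t ih =>
    intro x b y ha hx h
    cases x with
    | nil =>
      simp only [List.cons_append, List.nil_append, List.cons.injEq] at h
      exact absurd (h.1.symm ▸ List.mem_cons_self ..) ha
    | cons d u =>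
      simp only [List.cons_append, List.cons.injEq] at h
      obtain ⟨h1, h2⟩ := ih u b y (fun hm => ha (List.mem_cons_of_mem _ hm))
        (fun hm => hx (List.mem_cons_of_mem _ hm)) h.2
      exact ⟨by simp [h.1, h1], h2⟩

-- what B computes, as a function of the prefix lookup's result (stated over A's dict form)
def pvB (P : List Char) (o : Option (List Char)) : List Char :=
  match o with
  | none => P
  | some en =>
    if P = PySem.Chars.join ['/'] ((PySem.Chars.splitOn P ['/']).take 2) then en
    else en ++ ['/'] ++ PySem.Chars.join ['/'] (((PySem.Chars.splitOn P ['/']).drop 2).map pvMapSlug)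

lemma pvMain (P : List Char) : ∀ (entries : List (String × String)),
    (∀ kv ∈ entries, (pvSplit kv.1.toList).length = 2) →
    pvALoop entries P =
      pvB P (PySem.Dict.get? (PySem.Dict.mk (entries.map (fun kv => (kv.1.toList, kv.2.toList))))
        (PySem.Chars.join ['/'] ((PySem.Chars.splitOn P ['/']).take 2))) := by
  intro entries
  induction entries with
  | nil => intro _; simp [pvALoop, PySem.Dict.get?, pvB]
  | cons kv rest ih =>
    intro hgood
    obtain ⟨pl, en⟩ := kv
    obtain ⟨a, hsa⟩ := List.exists_cons_of_ne_nil (pvSplit_ne_nil pl.toList)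
    obtain ⟨r0, hr0⟩ := hsa
    have hlen := hgood (pl, en) (List.mem_cons_self ..)
    rw [hr0] at hlen
    simp only [List.length_cons] at hlen
    have hr0ne : r0 ≠ [] := by intro hnil; rw [hnil] at hlen; simp at hlen
    obtain ⟨b, r1, hr1⟩ := List.exists_cons_of_ne_nil hr0ne
    rw [hr1] at hr0 hlen
    have hr1nil : r1 = [] := by
      cases r1 with
      | nil => rfl
      | cons _ _ => simp at hlen
    subst hr1nil
    have hk : pl.toList = a ++ '/' :: b := by
      have := pvJoin_pvSplit pl.toList
      rw [hr0, PySem.Chars.join_cons_cons, PySem.Chars.join_singleton] at this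
      simpa using this.symm
    have ha : '/' ∉ a := pvMem_pvSplit_no_sep pl.toList a (hr0 ▸ List.mem_cons_self ..)
    have hb : '/' ∉ b := pvMem_pvSplit_no_sep pl.toList b (hr0 ▸ (List.mem_cons_of_mem _ (List.mem_cons_self ..)))
    by_cases h1 : PySem.Chars.startswith P (pl.toList ++ ['/']) = true
    · obtain ⟨r, hrP⟩ := (PySem.Chars.startswith_iff P (pl.toList ++ ['/'])).mp h1
      have hP : P = pl.toList ++ '/' :: r := by
        rw [← hrP]; simp
      have hsplitP : pvSplit P = a :: b :: pvSplit r := by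
        rw [hP, hk]
        have : (a ++ '/' :: b) ++ '/' :: r = a ++ '/' :: (b ++ '/' :: r) := by simp
        rw [this, pvSplit_append _ ha, pvSplit_append _ hb]
      have hpre : PySem.Chars.join ['/'] ((PySem.Chars.splitOn P ['/']).take 2) = pl.toList := by
        rw [pvSplitOn_eq, hsplitP]
        simp only [List.take_succ_cons, List.take_zero]
        rw [PySem.Chars.join_cons_cons, PySem.Chars.join_singleton, hk]
        simp
      have hget : PySem.Dict.get? (PySem.Dict.mk (((pl, en) :: rest).map (fun kv => (kv.1.toList, kv.2.toList)))) pl.toList = some en.toList := by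
        simp [PySem.Dict.get?]
      have hne : P ≠ pl.toList := by
        rw [hP]; intro hcontra
        have := congrArg List.length hcontra
        simp at this
      rw [pvALoop, if_pos h1, hpre, hget]
      simp only [pvB]
      rw [hpre, if_neg hne]
      have hslice : PySem.List.slice P (some (PySem.Str.len pl + 1)) none = r := by
        rw [PySem.Str.len_eq]
        rw [PySem.List.slice_from P (by positivity)]
        have : ((pl.toList.length : Int) + 1).toNat = pl.toList.length + 1 := by omega
        rw [this, hP]
        rw [show pl.toList ++ '/' :: r = (pl.toList ++ ['/']) ++ r by simp]
        rw [show pl.toList.length + 1 = (pl.toList ++ ['/']).length by simp]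
        exact List.drop_left
      rw [hslice, pvSplitOn_eq P, hsplitP, pvSplitOn_eq r]
      simp
    · by_cases h2 : P = pl.toList
      · have hsplitP : pvSplit P = [a, b] := by
          rw [h2, hk, pvSplit_append _ ha, pvSplit_no_sep hb]
        have hpre : PySem.Chars.join ['/'] ((PySem.Chars.splitOn P ['/']).take 2) = pl.toList := by
          rw [pvSplitOn_eq, hsplitP]
          simp only [List.take_succ_cons, List.take_zero]
          rw [PySem.Chars.join_cons_cons, PySem.Chars.join_singleton, hk]
          simp
        have hget : PySem.Dict.get? (PySem.Dict.mk (((pl, en) :: rest).map (fun kv => (kv.1.toList, kv.2.toList)))) pl.toList = some en.toList := by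
          simp [PySem.Dict.get?]
        rw [pvALoop, if_neg h1, if_pos h2, hpre, hget]
        simp only [pvB]
        rw [hpre, if_pos h2]
      · have hprene : PySem.Chars.join ['/'] ((PySem.Chars.splitOn P ['/']).take 2) ≠ pl.toList := by
          intro hpre
          rw [pvSplitOn_eq] at hpre
          obtain ⟨p0, ps, hps⟩ := List.exists_cons_of_ne_nil (pvSplit_ne_nil P)
          cases ps with
          | nil =>
            rw [hps] at hpre
            simp only [List.take_succ_cons, List.take_nil, PySem.Chars.join_singleton] at hpre
            have hPp : P = p0 := by
              have := pvJoin_pvSplit P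
              rw [hps, PySem.Chars.join_singleton] at this
              exact this.symm
            exact h2 (hPp.trans hpre)
          | cons p1 ps' =>
            rw [hps] at hpre
            simp only [List.take_succ_cons, List.take_zero] at hpre
            rw [PySem.Chars.join_cons_cons, PySem.Chars.join_singleton] at hpre
            have hp0 : '/' ∉ p0 := pvMem_pvSplit_no_sep P p0 (hps ▸ List.mem_cons_self ..)
            have hp1 : '/' ∉ p1 := pvMem_pvSplit_no_sep P p1 (hps ▸ (List.mem_cons_of_mem _ (List.mem_cons_self ..)))
            rw [hk] at hpre
            have hpre' : p0 ++ '/' :: p1 = a ++ '/' :: b := by simpa using hpre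
            obtain ⟨hpa, hpb⟩ := pvSegUnique p0 a p1 b hp0 ha hpre'
            cases ps' with
            | nil =>
              have hPp : P = pl.toList := by
                have := pvJoin_pvSplit P
                rw [hps, PySem.Chars.join_cons_cons, PySem.Chars.join_singleton, hpa, hpb] at this
                rw [hk, ← this]
                simp
              exact h2 hPp
            | cons q ps'' =>
              have hPp : P = (pl.toList ++ ['/']) ++ PySem.Chars.join ['/'] (q :: ps'') := by
                have := pvJoin_pvSplit P
                rw [hps, PySem.Chars.join_cons_cons, PySem.Chars.join_cons_cons, hpa, hpb] at this
                rw [← this, hk]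
                simp
              apply h1
              rw [PySem.Chars.startswith_iff, hPp]
              exact ⟨_, rfl⟩
        have hget : PySem.Dict.get? (PySem.Dict.mk (((pl, en) :: rest).map (fun kv => (kv.1.toList, kv.2.toList)))) (PySem.Chars.join ['/'] ((PySem.Chars.splitOn P ['/']).take 2)) = PySem.Dict.get? (PySem.Dict.mk (rest.map (fun kv => (kv.1.toList, kv.2.toList)))) (PySem.Chars.join ['/'] ((PySem.Chars.splitOn P ['/']).take 2)) := by
          simp only [PySem.Dict.get?, List.map_cons]
          rw [List.find?_cons_of_neg]
          intro hh
          simp only [beq_iff_eq] at hh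
          exact hprene hh.symm
        rw [pvALoop, if_neg h1, if_neg h2, hget]
        exact ih (fun kv hkv => hgood kv (List.mem_cons_of_mem _ hkv))

lemma pvGood : ∀ kv ∈ pvPlEnMap, (pvSplit kv.1.toList).length = 2 := by decide

-- ===== VERDICT (by name: the statement is the Claim_ definition above) =====
theorem get_translation_key_spec : Claim_equal_get_translation_key := by
  intro path _
  unfold Spec_get_translation_key get_translation_key get_translation_key_alt
  rw [pvMain path.toList pvPlEnMap pvGood, pvEnPrefix?_eq]
  cases hget : pvEnPrefix? (PySem.Chars.join ['/'] ((PySem.Chars.splitOn path.toList ['/']).take 2)) with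
  | none => simp [pvB, hget]
  | some en =>
    simp only [pvB, hget]
    split_ifs with h
    · rfl
    · simp [List.map_congr_left (fun q _ => pvSlugEn_eq q)]
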